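-- pv_equiv track=rewrite | github.com/Gnegnery/Projet-Bio | .ipynb_checkpoints/motifsSearch-checkpoint.py | searchGivenMotif
-- ===== SOURCE A (Python) =====
-- def searchGivenMotif(motifsDict, motifSpecifique, decroissant = True):
--     """
--     Cherche un motif specifique dans un dictionnaire de motifs trouvés
--     entrée motifsDict : dictionnaire de motifs, clé = motif, valeur = fréquence d'observation
--     entrée motifSpecifique: un motif specifique à chercher
--     entrée decroissant : bool, si True, le dictionnaire est trié par ordre décroissant de valeur
--     sortie fréquence : la fréquence du motif
--     sortie ranking : dans quelle position le motif a été trouvé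
--     >>>searchGivenMotif(test_motifs, "TAT")
--     (2, 2)
--     """
--
--     ranking = 0
--     frequence = 0
--     motifsfreq = sorted(motifsDict, key=lambda m: motifsDict[m], reverse=decroissant)
--
--     for motif in motifsfreq:
--         ranking += 1
--         if motif == motifSpecifique:
--             frequence = motifsDict[motif]
--             break
--
--     return ranking, frequence
-- ===== SOURCE B (Python) =====
-- def searchGivenMotif(motifsDict, motifSpecifique, decroissant=True):
--     freq = motifsDict.get(motifSpecifique)
--     if freq is None:
--         return len(motifsDict), 0
--     ahead = 0
--     before = True
--     for motif, v in motifsDict.items():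
--         if motif == motifSpecifique:
--             before = False
--         elif (v > freq if decroissant else v < freq) or (v == freq and before):
--             ahead += 1
--     return ahead + 1, freq
-- ===== Notes on version B (the rewrite author's own statement) =====
-- stated objective: alternative
-- what changed: Instead of sorting all keys by frequency and scanning the sorted list for the motif, B looks the motif up once and computes its rank in a single pass by counting entries with strictly better frequency plus equal-frequency entries that precede it in insertion order (stable-sort rank); asymptotically O(n) vs O(n log n), but A's C-level sort with an early-exit scan is not consistently slower in measurement.
import Mathlib
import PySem

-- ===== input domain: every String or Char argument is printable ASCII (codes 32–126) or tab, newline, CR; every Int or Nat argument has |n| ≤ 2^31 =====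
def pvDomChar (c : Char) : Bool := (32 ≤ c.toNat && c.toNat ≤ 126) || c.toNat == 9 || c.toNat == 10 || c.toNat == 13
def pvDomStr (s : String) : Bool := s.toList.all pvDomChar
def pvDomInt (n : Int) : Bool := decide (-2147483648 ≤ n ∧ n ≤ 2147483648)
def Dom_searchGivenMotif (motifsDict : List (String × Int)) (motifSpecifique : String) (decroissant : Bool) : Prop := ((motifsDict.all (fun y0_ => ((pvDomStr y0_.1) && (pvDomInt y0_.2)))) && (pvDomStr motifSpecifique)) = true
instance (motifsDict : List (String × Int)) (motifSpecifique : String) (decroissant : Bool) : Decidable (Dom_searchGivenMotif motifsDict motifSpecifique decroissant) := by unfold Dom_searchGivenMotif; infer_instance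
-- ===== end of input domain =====

-- B replaces A's sort-then-scan by a single counting pass that computes the stable-sort rank directly (alternative algorithm, O(n) pass instead of a sort).

-- ===== PORT A =====
-- A's for-loop with break: ranking += 1, stop when the motif is found.
def pvLoopA (d : PySem.Dict String Int) (motifSpecifique : String) : List String → Int → Int × Int
  | [], ranking => (ranking, 0)
  | motif :: rest, ranking =>
    if motif = motifSpecifique then (ranking + 1, d.getD motif 0)
    else pvLoopA d motifSpecifique rest (ranking + 1)

def searchGivenMotif (motifsDict : List (String × Int)) (motifSpecifique : String) (decroissant : Bool) : Int × Int :=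
  let d : PySem.Dict String Int := PySem.Dict.mk motifsDict
  let motifsfreq := PySem.List.sorted (motifsDict.map Prod.fst) (fun m => d.getD m 0) decroissant
  pvLoopA d motifSpecifique motifsfreq 0

-- ===== PORT B =====
-- one step of B's single pass: flag st.2 = "still before the motif in insertion order"
def pvStepB (motifSpecifique : String) (freq : Int) (decroissant : Bool) (st : Int × Bool) (kv : String × Int) : Int × Bool :=
  if kv.1 = motifSpecifique then (st.1, false)
  else if (if decroissant then decide (freq < kv.2) else decide (kv.2 < freq)) || (decide (kv.2 = freq) && st.2) then (st.1 + 1, st.2)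
  else st

def searchGivenMotif_alt (motifsDict : List (String × Int)) (motifSpecifique : String) (decroissant : Bool) : Int × Int :=
  match (PySem.Dict.mk motifsDict).get? motifSpecifique with
  | none => ((motifsDict.length : Int), 0)
  | some freq =>
    let st := motifsDict.foldl (pvStepB motifSpecifique freq decroissant) (0, true)
    (st.1 + 1, freq)

-- ===== PRECONDITION & SPEC =====
-- Pre_ excludes association lists with duplicate keys: the Python function receives a dict, so such
-- lists do not denote a dict unambiguously (Python keeps the first position but the last value).
def Pre_searchGivenMotif (motifsDict : List (String × Int)) (motifSpecifique : String) (decroissant : Bool) : Prop :=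
  (motifsDict.map Prod.fst).Nodup
instance (motifsDict : List (String × Int)) (motifSpecifique : String) (decroissant : Bool) : Decidable (Pre_searchGivenMotif motifsDict motifSpecifique decroissant) := by unfold Pre_searchGivenMotif; infer_instance

def pvWitness_searchGivenMotif : (List (String × Int)) × String × Bool := ([("ATG", 3), ("TAT", 2), ("GCC", 2)], "TAT", true)

def Spec_searchGivenMotif (motifsDict : List (String × Int)) (motifSpecifique : String) (decroissant : Bool) (out : Int × Int) : Prop := out = searchGivenMotif_alt motifsDict motifSpecifique decroissant
instance (motifsDict : List (String × Int)) (motifSpecifique : String) (decroissant : Bool) (out : Int × Int) : Decidable (Spec_searchGivenMotif motifsDict motifSpecifique decroissant out) := by unfold Spec_searchGivenMotif; infer_instance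

-- ===== CLAIM (what is proved, stated in full; the proofs are below) =====
def Claim_equal_searchGivenMotif : Prop := ∀ (motifsDict : List (String × Int)) (motifSpecifique : String) (decroissant : Bool), Dom_searchGivenMotif motifsDict motifSpecifique decroissant → Pre_searchGivenMotif motifsDict motifSpecifique decroissant → Spec_searchGivenMotif motifsDict motifSpecifique decroissant (searchGivenMotif motifsDict motifSpecifique decroissant)

-- ===== LEMMAS AND PROOFS =====

-- the comparison used by Python's stable sort: "a must come strictly before b"
def pvBef (dec : Bool) (x y : Int) : Bool := if dec then decide (y < x) else decide (x < y)

-- index of the first occurrence of m (length of the m-free prefix)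
def pvIdx (m : String) : List String → Nat
  | [] => 0
  | y :: ys => if y = m then 0 else pvIdx m ys + 1

theorem pvBef_trans {dec : Bool} {x y z : Int} (h1 : pvBef dec x y = true)
    (h2 : pvBef dec z y = false) : pvBef dec x z = true := by
  cases dec <;> simp [pvBef] at * <;> omega

-- sorted as a left fold of stable insertions, uniformly in the reverse flag
theorem pv_sorted_foldl (xs : List String) (val : String → Int) (dec : Bool) :
    PySem.List.sorted xs val dec =
      xs.foldl (fun acc x => PySem.List.insertBy (fun a b => pvBef dec (val a) (val b)) x acc) [] := by
  cases dec
  · exact PySem.List.sorted_eq_foldl_insertBy xs val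
  · exact PySem.List.sorted_rev_eq_foldl_insertBy xs val

theorem pv_sorted_pairwise (xs : List String) (val : String → Int) (dec : Bool) :
    (PySem.List.sorted xs val dec).Pairwise (fun a b => pvBef dec (val b) (val a) = false) := by
  cases dec
  · exact (PySem.List.sorted_pairwise xs val).imp (by intro a b h; simp [pvBef]; omega)
  · exact (PySem.List.sorted_pairwise_rev xs val).imp (by intro a b h; simp [pvBef]; omega)

-- E1: index of m right after its own stable insertion into a sorted list not containing it
theorem pv_idx_insert_self {dec : Bool} {val : String → Int} {m : String} :
    ∀ (L : List String), m ∉ L →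
      L.Pairwise (fun a b => pvBef dec (val b) (val a) = false) →
      pvIdx m (PySem.List.insertBy (fun a b => pvBef dec (val a) (val b)) m L)
        = L.countP (fun y => !(pvBef dec (val m) (val y))) := by
  intro L
  induction L with
  | nil => intro _ _; simp [PySem.List.insertBy, pvIdx]
  | cons y ys ih =>
    intro hm hp
    simp only [List.mem_cons, not_or] at hm
    by_cases h : pvBef dec (val m) (val y) = true
    · simp only [PySem.List.insertBy, h, if_pos]
      have hall : ∀ z ∈ y :: ys, (!(pvBef dec (val m) (val z))) = false := by
        intro z hz
        rcases List.mem_cons.mp hz with rfl | hz'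
        · simp [h]
        · have := (List.pairwise_cons.mp hp).1 z hz'
          simp [pvBef_trans h this]
      have : (y :: ys).countP (fun y => !(pvBef dec (val m) (val y))) = 0 := by
        rw [List.countP_eq_zero]; intro a ha; simp [hall a ha]
      rw [this]; simp [pvIdx]
    · have h' : pvBef dec (val m) (val y) = false := by simpa using h
      simp only [PySem.List.insertBy, h']
      simp only [Bool.false_eq_true, if_false]
      rw [List.countP_cons]
      have hyne : y ≠ m := fun e => hm.1 e.symm
      simp only [pvIdx, if_neg hyne]
      rw [ih hm.2 (List.pairwise_cons.mp hp).2]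
      simp [h']

-- E2: inserting an element x ≠ m shifts m's index by 1 exactly when x sorts strictly before m
theorem pv_idx_insert_other {dec : Bool} {val : String → Int} {m x : String} (hx : x ≠ m) :
    ∀ (L : List String), m ∈ L →
      L.Pairwise (fun a b => pvBef dec (val b) (val a) = false) →
      pvIdx m (PySem.List.insertBy (fun a b => pvBef dec (val a) (val b)) x L)
        = pvIdx m L + (if pvBef dec (val x) (val m) then 1 else 0) := by
  intro L
  induction L with
  | nil => intro h; simp at h
  | cons y ys ih =>
    intro hm hp
    by_cases h : pvBef dec (val x) (val y) = true
    · simp only [PySem.List.insertBy, h, if_pos]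
      have hbxm : pvBef dec (val x) (val m) = true := by
        rcases List.mem_cons.mp hm with rfl | hm'
        · exact h
        · exact pvBef_trans h ((List.pairwise_cons.mp hp).1 m hm')
      have l1 : pvIdx m (x :: y :: ys) = pvIdx m (y :: ys) + 1 := by simp [pvIdx, hx]
      rw [l1, hbxm]
      simp
    · have h' : pvBef dec (val x) (val y) = false := by simpa using h
      simp only [PySem.List.insertBy, h', Bool.false_eq_true, if_false]
      by_cases hy : y = m
      · subst hy
        have : pvBef dec (val x) (val y) = false := h'
        simp [pvIdx, this]
      · simp only [pvIdx, if_neg hy]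
        have hm' : m ∈ ys := by rcases List.mem_cons.mp hm with rfl | hm' <;> [exact absurd rfl hy; exact hm']
        rw [ih hm' (List.pairwise_cons.mp hp).2]
        split_ifs <;> omega

-- C: folding the remaining insertions over an already-built sorted prefix
theorem pv_idx_fold {dec : Bool} {val : String → Int} {m : String} :
    ∀ (xs : List String) (pre : List String), m ∈ pre → (∀ x ∈ xs, x ≠ m) →
      pvIdx m (xs.foldl (fun acc x => PySem.List.insertBy (fun a b => pvBef dec (val a) (val b)) x acc)
          (PySem.List.sorted pre val dec))
        = pvIdx m (PySem.List.sorted pre val dec) + xs.countP (fun k => pvBef dec (val k) (val m)) := by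
  intro xs
  induction xs with
  | nil => intro pre _ _; simp
  | cons x xs ih =>
    intro pre hm hxs
    have hstep : PySem.List.insertBy (fun a b => pvBef dec (val a) (val b)) x (PySem.List.sorted pre val dec)
        = PySem.List.sorted (pre ++ [x]) val dec := by
      rw [pv_sorted_foldl pre val dec, pv_sorted_foldl (pre ++ [x]) val dec, List.foldl_append]
      rfl
    simp only [List.foldl_cons, hstep]
    rw [ih (pre ++ [x]) (by simp [hm]) (fun y hy => hxs y (List.mem_cons_of_mem _ hy))]
    rw [← hstep, pv_idx_insert_other (hxs x (List.mem_cons_self)) (PySem.List.sorted pre val dec)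
      ((PySem.List.mem_sorted pre val dec m).mpr hm) (pv_sorted_pairwise pre val dec)]
    rw [List.countP_cons]
    by_cases h : pvBef dec (val x) (val m) = true <;> simp [h] <;> omega

-- A's loop when the motif is absent / present
theorem pvLoopA_absent (d : PySem.Dict String Int) (m : String) :
    ∀ (S : List String) (r : Int), m ∉ S → pvLoopA d m S r = (r + S.length, 0) := by
  intro S
  induction S with
  | nil => intro r _; simp [pvLoopA]
  | cons y ys ih =>
    intro r hm
    simp only [List.mem_cons, not_or] at hm
    simp only [pvLoopA]
    rw [if_neg (show ¬ y = m from fun e => hm.1 e.symm)]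
    rw [ih _ hm.2, Prod.mk.injEq]
    refine ⟨by simp only [List.length_cons]; push_cast; ring, rfl⟩

theorem pvLoopA_present (d : PySem.Dict String Int) (m : String) :
    ∀ (S : List String) (r : Int), m ∈ S → pvLoopA d m S r = (r + pvIdx m S + 1, d.getD m 0) := by
  intro S
  induction S with
  | nil => intro r h; simp at h
  | cons y ys ih =>
    intro r hm
    by_cases hy : y = m
    · subst hy; simp [pvLoopA, pvIdx]
    · have hm' : m ∈ ys := by rcases List.mem_cons.mp hm with rfl | h <;> [exact absurd rfl hy; exact h]
      simp only [pvLoopA, if_neg hy, pvIdx]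
      rw [ih _ hm', Prod.mk.injEq]
      refine ⟨by push_cast; ring, rfl⟩

-- B's pass over the entries before the motif (flag still true)
theorem pvFoldB_before (m : String) (freq : Int) (dec : Bool) :
    ∀ (p : List (String × Int)) (c : Int), (∀ kv ∈ p, kv.1 ≠ m) →
      p.foldl (pvStepB m freq dec) (c, true)
        = (c + p.countP (fun kv => (if dec then decide (freq < kv.2) else decide (kv.2 < freq)) || decide (kv.2 = freq)), true) := by
  intro p
  induction p with
  | nil => intro c _; simp
  | cons kv p ih =>
    intro c h
    have h1 := h kv (List.mem_cons_self)
    simp only [List.foldl_cons, pvStepB, if_neg h1, Bool.and_true]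
    by_cases hc : ((if dec then decide (freq < kv.2) else decide (kv.2 < freq)) || decide (kv.2 = freq)) = true
    · rw [if_pos hc, ih _ (fun y hy => h y (List.mem_cons_of_mem _ hy)), List.countP_cons]
      rw [Prod.mk.injEq]
      refine ⟨by simp [hc]; push_cast; ring, rfl⟩
    · rw [if_neg hc, ih _ (fun y hy => h y (List.mem_cons_of_mem _ hy)), List.countP_cons]
      have hcf : ((if dec then decide (freq < kv.2) else decide (kv.2 < freq)) || decide (kv.2 = freq)) = false :=
        Bool.eq_false_iff.mpr hc
      simp [hcf]

-- B's pass over the entries after the motif (flag false: only strictly better entries count)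
theorem pvFoldB_after (m : String) (freq : Int) (dec : Bool) :
    ∀ (p : List (String × Int)) (c : Int), (∀ kv ∈ p, kv.1 ≠ m) →
      p.foldl (pvStepB m freq dec) (c, false)
        = (c + p.countP (fun kv => if dec then decide (freq < kv.2) else decide (kv.2 < freq)), false) := by
  intro p
  induction p with
  | nil => intro c _; simp
  | cons kv p ih =>
    intro c h
    have h1 := h kv (List.mem_cons_self)
    simp only [List.foldl_cons, pvStepB, if_neg h1, Bool.and_false, Bool.or_false]
    by_cases hc : (if dec then decide (freq < kv.2) else decide (kv.2 < freq)) = true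
    · rw [if_pos hc, ih _ (fun y hy => h y (List.mem_cons_of_mem _ hy)), List.countP_cons]
      rw [Prod.mk.injEq]
      refine ⟨by simp [hc]; push_cast; ring, rfl⟩
    · rw [if_neg hc, ih _ (fun y hy => h y (List.mem_cons_of_mem _ hy)), List.countP_cons]
      have hcf : (if dec then decide (freq < kv.2) else decide (kv.2 < freq)) = false :=
        Bool.eq_false_iff.mpr hc
      simp [hcf]

-- first-match lookup on a split list whose first part avoids the key
theorem pv_get?_split (p1 p2 : List (String × Int)) (m : String) (v : Int)
    (h1 : ∀ kv ∈ p1, kv.1 ≠ m) :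
    (PySem.Dict.mk (p1 ++ (m, v) :: p2)).get? m = some v := by
  simp only [PySem.Dict.get?]
  rw [List.find?_append]
  have : List.find? (fun p => p.1 == m) p1 = none := by
    rw [List.find?_eq_none]; intro x hx; simpa using h1 x hx
  simp [this]

-- with nodup keys, the dict lookup of any listed key returns its listed value
theorem pv_get?_of_mem (md : List (String × Int)) (k : String) (w : Int)
    (hnd : (md.map Prod.fst).Nodup) (hmem : (k, w) ∈ md) :
    (PySem.Dict.mk md).get? k = some w := by
  rcases List.append_of_mem hmem with ⟨s, t, rfl⟩
  apply pv_get?_split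
  intro kv hkv he
  have hmem1 : kv.1 ∈ s.map Prod.fst := List.mem_map_of_mem hkv
  rw [he] at hmem1
  have hnd' := hnd
  rw [List.map_append, List.map_cons, List.nodup_append] at hnd'
  exact hnd'.2.2 k hmem1 k (by simp) rfl

-- index of m in the full stable sort, as two counts over the original two sides of m
theorem pv_idx_sorted (val : String → Int) (dec : Bool) (k1 k2 : List String) (m : String)
    (h1 : m ∉ k1) (h2 : m ∉ k2) :
    pvIdx m (PySem.List.sorted (k1 ++ m :: k2) val dec)
      = k1.countP (fun y => !(pvBef dec (val m) (val y))) + k2.countP (fun k => pvBef dec (val k) (val m)) := by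
  have hsplit : PySem.List.sorted (k1 ++ m :: k2) val dec
      = k2.foldl (fun acc x => PySem.List.insertBy (fun a b => pvBef dec (val a) (val b)) x acc)
          (PySem.List.sorted (k1 ++ [m]) val dec) := by
    rw [pv_sorted_foldl, pv_sorted_foldl, ← List.foldl_append, ← List.append_cons]
  rw [hsplit, pv_idx_fold k2 (k1 ++ [m]) (by simp) (fun x hx he => h2 (by rwa [he] at hx))]
  have hins : PySem.List.sorted (k1 ++ [m]) val dec
      = PySem.List.insertBy (fun a b => pvBef dec (val a) (val b)) m (PySem.List.sorted k1 val dec) := by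
    rw [pv_sorted_foldl, pv_sorted_foldl, List.foldl_append]
    rfl
  rw [hins, pv_idx_insert_self _ (fun h => h1 ((PySem.List.mem_sorted _ _ _ _).mp h))
    (pv_sorted_pairwise _ _ _)]
  rw [(PySem.List.sorted_perm k1 val dec).countP_eq]

theorem pvBef_not (dec : Bool) (v w : Int) :
    (!(pvBef dec v w)) = ((if dec then decide (v < w) else decide (w < v)) || decide (w = v)) := by
  cases dec <;> simp only [pvBef, Bool.false_eq_true, if_false, if_true, ← decide_not,
    ← Bool.decide_or, decide_eq_decide] <;> omega

theorem pvBef_swap (dec : Bool) (v w : Int) :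
    pvBef dec w v = (if dec then decide (v < w) else decide (w < v)) := by
  cases dec <;> rfl

-- a count over the keys, with the dict lookup as value, equals the same count over the pairs
theorem pv_count_map (p : List (String × Int)) (val : String → Int)
    (hv : ∀ kv ∈ p, val kv.1 = kv.2) (q : Int → Bool) :
    (p.map Prod.fst).countP (fun k => q (val k)) = p.countP (fun kv => q kv.2) := by
  rw [List.countP_map]
  exact List.countP_congr (fun kv hkv => by simp [Function.comp, hv kv hkv])

-- ===== VERDICT (by name: the statement is the Claim_ definition above) =====
theorem searchGivenMotif_spec : Claim_equal_searchGivenMotif := by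
  intro md motif dec _ hpre
  unfold Spec_searchGivenMotif
  by_cases hmem : motif ∈ md.map Prod.fst
  · -- the motif is a key: split md around its (unique) entry
    rcases List.mem_map.mp hmem with ⟨kv0, hkv0, hk1⟩
    obtain ⟨k0, v⟩ := kv0
    simp only at hk1
    subst hk1
    rcases List.append_of_mem hkv0 with ⟨p1, p2, rfl⟩
    have hpre' := hpre
    unfold Pre_searchGivenMotif at hpre'
    rw [List.map_append, List.map_cons, List.nodup_append] at hpre'
    obtain ⟨hnd1, hnd2, hdisj⟩ := hpre'
    have h1 : ∀ kv ∈ p1, kv.1 ≠ k0 := fun kv hkv =>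
      hdisj kv.1 (List.mem_map_of_mem hkv) k0 (by simp)
    have hm2 : k0 ∉ p2.map Prod.fst := (List.nodup_cons.mp (by simpa using hnd2)).1
    have h2 : ∀ kv ∈ p2, kv.1 ≠ k0 := fun kv hkv he => hm2 (he ▸ List.mem_map_of_mem hkv)
    have hm1 : k0 ∉ p1.map Prod.fst := by
      intro h
      rcases List.mem_map.mp h with ⟨kv, hkv, he⟩
      exact h1 kv hkv he
    have hget : (PySem.Dict.mk (p1 ++ (k0, v) :: p2)).get? k0 = some v := pv_get?_split p1 p2 k0 v h1
    have hvalm : (PySem.Dict.mk (p1 ++ (k0, v) :: p2)).getD k0 0 = v := by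
      simp [PySem.Dict.getD, hget]
    have hvalp : ∀ kv ∈ p1 ++ (k0, v) :: p2, (PySem.Dict.mk (p1 ++ (k0, v) :: p2)).getD kv.1 0 = kv.2 := by
      intro kv hkv
      rw [PySem.Dict.getD, pv_get?_of_mem _ kv.1 kv.2 hpre (by simpa using hkv)]
      rfl
    -- B's value
    have hB : searchGivenMotif_alt (p1 ++ (k0, v) :: p2) k0 dec
        = (↑(p1.countP fun kv => (if dec then decide (v < kv.2) else decide (kv.2 < v)) || decide (kv.2 = v))
           + ↑(p2.countP fun kv => if dec then decide (v < kv.2) else decide (kv.2 < v)) + 1, v) := by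
      simp only [searchGivenMotif_alt, hget]
      rw [List.foldl_append, pvFoldB_before k0 v dec p1 0 h1, List.foldl_cons]
      have hstep : pvStepB k0 v dec
          (0 + ↑(p1.countP fun kv => (if dec then decide (v < kv.2) else decide (kv.2 < v)) || decide (kv.2 = v)), true)
          ((k0, v)) = ((0 : Int) + ↑(p1.countP fun kv => (if dec then decide (v < kv.2) else decide (kv.2 < v)) || decide (kv.2 = v)), false) := by
        simp [pvStepB]
      rw [hstep, pvFoldB_after k0 v dec p2 _ h2]
      rw [Prod.mk.injEq]
      refine ⟨by push_cast; ring, rfl⟩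
    -- A's value
    have hmemS : k0 ∈ PySem.List.sorted (p1.map Prod.fst ++ k0 :: p2.map Prod.fst)
        (fun m => (PySem.Dict.mk (p1 ++ (k0, v) :: p2)).getD m 0) dec :=
      (PySem.List.mem_sorted _ _ _ _).mpr (by simp)
    have hA : searchGivenMotif (p1 ++ (k0, v) :: p2) k0 dec
        = ((↑(pvIdx k0 (PySem.List.sorted (p1.map Prod.fst ++ k0 :: p2.map Prod.fst)
            (fun m => (PySem.Dict.mk (p1 ++ (k0, v) :: p2)).getD m 0) dec)) : Int) + 1, v) := by
      simp only [searchGivenMotif, List.map_append, List.map_cons]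
      rw [pvLoopA_present _ _ _ _ hmemS, hvalm]
      rw [Prod.mk.injEq]
      refine ⟨by push_cast; ring, rfl⟩
    rw [hA, hB]
    rw [pv_idx_sorted _ dec _ _ _ hm1 hm2]
    rw [hvalm]
    have e1 : (p1.map Prod.fst).countP
        (fun y => !(pvBef dec v ((PySem.Dict.mk (p1 ++ (k0, v) :: p2)).getD y 0)))
        = p1.countP fun kv => (if dec then decide (v < kv.2) else decide (kv.2 < v)) || decide (kv.2 = v) := by
      rw [pv_count_map p1 _ (fun kv hkv => hvalp kv (by simp [hkv])) (fun w => !(pvBef dec v w))]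
      exact List.countP_congr (fun kv _ => by rw [pvBef_not])
    have e2 : (p2.map Prod.fst).countP
        (fun k => pvBef dec ((PySem.Dict.mk (p1 ++ (k0, v) :: p2)).getD k 0) v)
        = p2.countP fun kv => if dec then decide (v < kv.2) else decide (kv.2 < v) := by
      rw [pv_count_map p2 _ (fun kv hkv => hvalp kv (by simp [hkv])) (fun w => pvBef dec w v)]
      exact List.countP_congr (fun kv _ => by rw [pvBef_swap])
    rw [e1, e2, Prod.mk.injEq]
    refine ⟨by push_cast; ring, rfl⟩
  · -- the motif is not a key
    have hfind : List.find? (fun p => p.1 == motif) md = none :=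
      List.find?_eq_none.mpr (fun x hx hb => hmem (by
        have h := List.mem_map_of_mem (f := Prod.fst) hx
        rwa [eq_of_beq hb] at h))
    have hg : (PySem.Dict.mk md).get? motif = none := by
      simp [PySem.Dict.get?, hfind]
    have hnotin : motif ∉ PySem.List.sorted (md.map Prod.fst)
        (fun m => (PySem.Dict.mk md).getD m 0) dec := by
      intro h; exact hmem ((PySem.List.mem_sorted _ _ _ _).mp h)
    simp only [searchGivenMotif, searchGivenMotif_alt, hg]
    rw [pvLoopA_absent _ _ _ _ hnotin, PySem.List.length_sorted, List.length_map]
    simp
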